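-- pv_equiv track=rewrite | github.com/tomdu3/free-codecamp-challenges | daily_challenge_fcc/2026/2026-01/26-01-03/left_handed.py | find_left_handed_seats
-- ===== SOURCE A (Python) =====
-- def find_left_handed_seats(table):
--     available_seats = 0
--     for r_idx, row in enumerate(table):
--         for c_idx, seat in enumerate(row):
--             if seat == "U":
--                 if r_idx % 2 == 0:
--                     if c_idx < len(row) - 1:
--                         if row[c_idx + 1] != "R":
--                             available_seats += 1
--                     else:
--                         available_seats += 1
--                 else:
--                     if c_idx > 0:
--                         if row[c_idx - 1] != "R":
--                             available_seats += 1
--                     else: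
--                         available_seats += 1
--     return available_seats
-- ===== SOURCE B (Python) =====
-- def find_left_handed_seats(table):
--     # Count per row: all "U" seats minus the adjacent pairs that block them
--     # (U immediately followed by R on even rows; R immediately before U on odd rows).
--     total = 0
--     for i, row in enumerate(table):
--         if i % 2 == 0:
--             bad = sum(1 for a, b in zip(row, row[1:]) if a == "U" and b == "R")
--         else:
--             bad = sum(1 for a, b in zip(row, row[1:]) if a == "R" and b == "U")
--         total += row.count("U") - bad
--     return total
-- ===== Notes on version B (the rewrite author's own statement) =====
-- stated objective: simpler
-- what changed: Replaces the per-seat conditional cascade with per-row arithmetic: count of 'U' seats minus a count over adjacent pairs (U followed by R on even rows, R before U on odd rows), removing all index arithmetic and boundary cases.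
import Mathlib
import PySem

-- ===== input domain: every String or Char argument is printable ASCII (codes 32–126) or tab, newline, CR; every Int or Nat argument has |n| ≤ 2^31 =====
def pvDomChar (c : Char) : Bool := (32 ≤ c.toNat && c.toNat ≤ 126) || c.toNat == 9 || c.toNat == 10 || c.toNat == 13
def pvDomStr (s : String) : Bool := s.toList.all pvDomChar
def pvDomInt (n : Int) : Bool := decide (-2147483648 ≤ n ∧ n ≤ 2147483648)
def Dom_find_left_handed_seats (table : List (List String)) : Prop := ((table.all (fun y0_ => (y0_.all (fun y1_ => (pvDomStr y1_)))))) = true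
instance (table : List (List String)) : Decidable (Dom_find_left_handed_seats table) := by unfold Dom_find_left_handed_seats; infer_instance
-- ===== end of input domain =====

-- B replaces A's per-seat conditional cascade (with index lookups) by per-row arithmetic:
-- count of "U" minus a count over adjacent pairs; objective: simpler.

-- ===== PORT A =====
def find_left_handed_seats (table : List (List String)) : Int :=
  (PySem.List.enumerate table 0).foldl (fun available_seats p =>
    let r_idx := p.1
    let row := p.2
    (PySem.List.enumerate row 0).foldl (fun acc q =>
      let c_idx := q.1
      let seat := q.2
      if seat = "U" then
        if PySem.Int.mod r_idx 2 = 0 then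
          if c_idx < (row.length : Int) - 1 then
            if PySem.List.pyGet? row (c_idx + 1) ≠ some "R" then acc + 1 else acc
          else acc + 1
        else
          if c_idx > 0 then
            if PySem.List.pyGet? row (c_idx - 1) ≠ some "R" then acc + 1 else acc
          else acc + 1
      else acc) available_seats) 0

-- ===== PORT B =====
def find_left_handed_seats_alt (table : List (List String)) : Int :=
  (PySem.List.enumerate table 0).foldl (fun total p =>
    let i := p.1
    let row := p.2
    let pairs := row.zip (PySem.List.slice row (some 1) none)   -- zip(row, row[1:])
    let bad : Int :=
      if PySem.Int.mod i 2 = 0 then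
        pairs.foldl (fun n q => if q.1 = "U" ∧ q.2 = "R" then n + 1 else n) 0
      else
        pairs.foldl (fun n q => if q.1 = "R" ∧ q.2 = "U" then n + 1 else n) 0
    total + ((PySem.List.count row "U" : Int) - bad)) 0

-- ===== PRECONDITION & SPEC =====
def Spec_find_left_handed_seats (table : List (List String)) (out : Int) : Prop := out = find_left_handed_seats_alt table
instance (table : List (List String)) (out : Int) : Decidable (Spec_find_left_handed_seats table out) := by unfold Spec_find_left_handed_seats; infer_instance

-- ===== CLAIM (what is proved, stated in full; the proofs are below) =====
def Claim_equal_find_left_handed_seats : Prop := ∀ (table : List (List String)), Dom_find_left_handed_seats table → Spec_find_left_handed_seats table (find_left_handed_seats table)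

-- ===== LEMMAS AND PROOFS =====

-- Recursive per-row specifications both ports are reduced to.
def specEven : List String → Int
  | [] => 0
  | [a] => if a = "U" then 1 else 0
  | a :: b :: t => (if a = "U" ∧ b ≠ "R" then 1 else 0) + specEven (b :: t)

def specOddP (p : String) : List String → Int
  | [] => 0
  | a :: t => (if a = "U" ∧ p ≠ "R" then 1 else 0) + specOddP a t

def specOdd : List String → Int
  | [] => 0
  | a :: u => (if a = "U" then 1 else 0) + specOddP a u

-- A's inner-loop body, specialised to an even / odd row index.
def stepEven (row : List String) (acc : Int) (q : Int × String) : Int :=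
  if q.2 = "U" then
    if q.1 < (row.length : Int) - 1 then
      if PySem.List.pyGet? row (q.1 + 1) ≠ some "R" then acc + 1 else acc
    else acc + 1
  else acc

def stepOdd (row : List String) (acc : Int) (q : Int × String) : Int :=
  if q.2 = "U" then
    if q.1 > 0 then
      if PySem.List.pyGet? row (q.1 - 1) ≠ some "R" then acc + 1 else acc
    else acc + 1
  else acc

-- A even row, generalised over an arbitrary processed prefix.
lemma Aeven : ∀ (t pre : List String) (acc : Int),
    (PySem.List.enumerate t (pre.length : Int)).foldl (stepEven (pre ++ t)) acc
      = acc + specEven t := by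
  intro t
  induction t with
  | nil => intro pre acc; simp [PySem.List.enumerate, specEven]
  | cons a u ih =>
    intro pre acc
    rw [PySem.List.enumerate_cons, List.foldl_cons]
    cases u with
    | nil =>
      by_cases ha : a = "U" <;>
        simp [PySem.List.enumerate, stepEven, specEven, ha]
    | cons b u' =>
      have hlen : (pre.length : Int) < ((pre ++ a :: b :: u').length : Int) - 1 := by
        simp [List.length_append]; omega
      have hget : PySem.List.pyGet? (pre ++ a :: b :: u') ((pre.length : Int) + 1) = some b := by
        have h1 : ((pre.length : Int) + 1) = ((pre.length + 1 : Nat) : Int) := by push_cast; ring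
        rw [h1, PySem.List.pyGet?_natCast]
        rw [List.getElem?_append_right (by omega)]
        simp
      have hihe : ((pre.length : Int) + 1) = (((pre ++ [a]).length : Nat) : Int) := by
        simp [List.length_append]
      have hfull : pre ++ a :: b :: u' = (pre ++ [a]) ++ b :: u' := by simp
      have hstep : stepEven (pre ++ a :: b :: u') acc ((pre.length : Int), a)
          = acc + (if a = "U" ∧ b ≠ "R" then 1 else 0) := by
        simp only [stepEven, hlen, if_pos, hget]
        by_cases ha : a = "U" <;> by_cases hb : b = "R" <;> simp [ha, hb]
      rw [hstep, hihe, hfull, ih (pre ++ [a])]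
      simp [specEven, add_assoc]

-- A odd row: the processed prefix ends in p, which is the seat to the left.
lemma Aodd : ∀ (t pre0 : List String) (p : String) (acc : Int),
    (PySem.List.enumerate t ((pre0.length + 1 : Nat) : Int)).foldl (stepOdd (pre0 ++ p :: t)) acc
      = acc + specOddP p t := by
  intro t
  induction t with
  | nil => intro pre0 p acc; simp [PySem.List.enumerate, specOddP]
  | cons a u ih =>
    intro pre0 p acc
    rw [PySem.List.enumerate_cons, List.foldl_cons]
    have hpos : (((pre0.length + 1 : Nat) : Int)) > 0 := by positivity
    have hget : PySem.List.pyGet? (pre0 ++ p :: a :: u) (((pre0.length + 1 : Nat) : Int) - 1)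
        = some p := by
      have h1 : (((pre0.length + 1 : Nat) : Int) - 1) = ((pre0.length : Nat) : Int) := by
        push_cast; ring
      rw [h1, PySem.List.pyGet?_natCast]
      rw [List.getElem?_append_right (by omega)]
      simp
    have hstep : stepOdd (pre0 ++ p :: a :: u) acc (((pre0.length + 1 : Nat) : Int), a)
        = acc + (if a = "U" ∧ p ≠ "R" then 1 else 0) := by
      simp only [stepOdd, hpos, if_pos, hget]
      by_cases ha : a = "U" <;> by_cases hp : p = "R" <;> simp [ha, hp]
    have hoff : (((pre0.length + 1 : Nat) : Int) + 1) = (((pre0 ++ [p]).length + 1 : Nat) : Int) := by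
      push_cast [List.length_append, List.length_singleton]; ring
    have hfull : pre0 ++ p :: a :: u = (pre0 ++ [p]) ++ a :: u := by simp
    rw [hstep, hoff, hfull, ih (pre0 ++ [p]) a]
    simp [specOddP, add_assoc]

lemma ArowEven (row : List String) (acc : Int) :
    (PySem.List.enumerate row 0).foldl (stepEven row) acc = acc + specEven row := by
  have h := Aeven row [] acc
  simpa using h

lemma ArowOdd (row : List String) (acc : Int) :
    (PySem.List.enumerate row 0).foldl (stepOdd row) acc = acc + specOdd row := by
  cases row with
  | nil => simp [PySem.List.enumerate, specOdd]
  | cons a u =>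
    rw [PySem.List.enumerate_cons, List.foldl_cons]
    have hstep : stepOdd (a :: u) acc (0, a) = acc + (if a = "U" then 1 else 0) := by
      by_cases ha : a = "U" <;> simp [stepOdd, ha]
    have h := Aodd u [] a (stepOdd (a :: u) acc (0, a))
    simp only [List.nil_append, List.length_nil, Nat.zero_add] at h
    rw [show (0 : Int) + 1 = ((0 + 1 : Nat) : Int) by simp, h, hstep]
    simp [specOdd, add_assoc]

-- B side: count "U" minus the pair count equals the same row specification.
lemma BEven : ∀ row : List String,
    (List.count "U" row : Int)
      - (List.countP (fun q => decide (q.1 = "U" ∧ q.2 = "R")) (row.zip row.tail) : Int)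
      = specEven row := by
  intro row
  induction row with
  | nil => simp [specEven]
  | cons a u ih =>
    cases u with
    | nil => by_cases ha : a = "U" <;> simp [specEven, ha]
    | cons b u' =>
      have hzip : (a :: b :: u').zip (a :: b :: u').tail
          = (a, b) :: ((b :: u').zip (b :: u').tail) := by simp
      rw [hzip, List.countP_cons, List.count_cons,
        show specEven (a :: b :: u')
          = (if a = "U" ∧ b ≠ "R" then 1 else 0) + specEven (b :: u') from rfl, ← ih]
      by_cases ha : a = "U" <;> by_cases hb : b = "R" <;>
        push_cast <;> simp [ha, hb] <;> ring

lemma BOddAux : ∀ (u : List String) (p : String),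
    (List.count "U" u : Int)
      - (List.countP (fun q => decide (q.1 = "R" ∧ q.2 = "U")) ((p :: u).zip u) : Int)
      = specOddP p u := by
  intro u
  induction u with
  | nil => intro p; simp [specOddP]
  | cons a u' ih =>
    intro p
    have hzip : (p :: a :: u').zip (a :: u') = (p, a) :: ((a :: u').zip u') := by simp
    rw [hzip, List.countP_cons, List.count_cons,
      show specOddP p (a :: u')
        = (if a = "U" ∧ p ≠ "R" then 1 else 0) + specOddP a u' from rfl, ← ih a]
    by_cases ha : a = "U" <;> by_cases hp : p = "R" <;>
      push_cast <;> simp [ha, hp] <;> ring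

lemma BOdd : ∀ row : List String,
    (List.count "U" row : Int)
      - (List.countP (fun q => decide (q.1 = "R" ∧ q.2 = "U")) (row.zip row.tail) : Int)
      = specOdd row := by
  intro row
  cases row with
  | nil => simp [specOdd]
  | cons a u =>
    rw [List.tail_cons, List.count_cons,
      show specOdd (a :: u) = (if a = "U" then 1 else 0) + specOddP a u from rfl,
      ← BOddAux u a]
    by_cases ha : a = "U" <;> push_cast <;> simp [ha] <;> ring

-- Turn a propositional counting fold into countP (so PySem.List.foldl_count_if applies).
lemma fold_pairs_eq_countP (P : String × String → Prop) [DecidablePred P]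
    (l : List (String × String)) :
    l.foldl (fun (n : Int) q => if P q then n + 1 else n) 0
      = (List.countP (fun q => decide (P q)) l : Int) := by
  have h : (fun (n : Int) q => if P q then n + 1 else n)
      = (fun (n : Int) q => if (fun q => decide (P q)) q = true then n + 1 else n) := by
    funext n q; simp
  rw [h, PySem.List.foldl_count_if]
  simp

-- ===== VERDICT (by name: the statement is the Claim_ definition above) =====
theorem find_left_handed_seats_spec : Claim_equal_find_left_handed_seats := by
  intro table _hdom
  unfold Spec_find_left_handed_seats find_left_handed_seats find_left_handed_seats_alt
  apply PySem.List.foldl_congr_mem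
  intro acc p _hp
  dsimp only
  rw [PySem.List.slice_from_one]
  have hA : ∀ (st : Int → (Int × String) → Int),
      (∀ (a : Int) (q : Int × String),
        (fun acc q =>
          if q.2 = "U" then
            if PySem.Int.mod p.1 2 = 0 then
              if q.1 < (p.2.length : Int) - 1 then
                if PySem.List.pyGet? p.2 (q.1 + 1) ≠ some "R" then acc + 1 else acc
              else acc + 1
            else
              if q.1 > 0 then
                if PySem.List.pyGet? p.2 (q.1 - 1) ≠ some "R" then acc + 1 else acc
              else acc + 1
          else acc) a q = st a q) →
      (PySem.List.enumerate p.2 0).foldl (fun acc q =>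
          if q.2 = "U" then
            if PySem.Int.mod p.1 2 = 0 then
              if q.1 < (p.2.length : Int) - 1 then
                if PySem.List.pyGet? p.2 (q.1 + 1) ≠ some "R" then acc + 1 else acc
              else acc + 1
            else
              if q.1 > 0 then
                if PySem.List.pyGet? p.2 (q.1 - 1) ≠ some "R" then acc + 1 else acc
              else acc + 1
          else acc) acc
        = (PySem.List.enumerate p.2 0).foldl st acc := by
    intro st h
    exact PySem.List.foldl_congr_mem _ _ _ _ (fun a q _ => h a q)
  by_cases hm : PySem.Int.mod p.1 2 = 0
  · rw [hA (stepEven p.2) (by intro a q; simp [stepEven, (PySem.Int.mod_eq_zero_iff_dvd p.1 2).mp hm]), ArowEven, if_pos hm,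
      fold_pairs_eq_countP (fun q => q.1 = "U" ∧ q.2 = "R"), PySem.List.count_eq, BEven]
  · rw [hA (stepOdd p.2) (by intro a q; simp [stepOdd, (PySem.Int.mod_eq_zero_iff_dvd p.1 2).not.mp hm]), ArowOdd, if_neg hm,
      fold_pairs_eq_countP (fun q => q.1 = "R" ∧ q.2 = "U"), PySem.List.count_eq, BOdd]
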